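-- pv_equiv track=rewrite | github.com/kinami0331/geekgame2024-writeup | code/algo-gzip/gen_flag1.py | has_repeated_substring
-- ===== SOURCE A (Python) =====
-- def has_repeated_substring(byte_stream):
--     substring_count = {}
--
--     for i in range(len(byte_stream) - 2):
--         substring = byte_stream[i:i+3]
--         if substring in substring_count:
--             substring_count[substring] += 1
--         else:
--             substring_count[substring] = 1
--         if substring_count[substring] > 1:
--             return True
--     return False
-- ===== SOURCE B (Python) =====
-- def has_repeated_substring(byte_stream):
--     subs = sorted(byte_stream[i:i+3] for i in range(len(byte_stream) - 2))
--     return any(subs[j] == subs[j + 1] for j in range(len(subs) - 1))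
-- ===== Notes on version B (the rewrite author's own statement) =====
-- stated objective: alternative
-- what changed: Replaces A's incremental hash-count loop with early return by a sort-then-scan: sort all 3-char slices lexicographically and report whether any two adjacent sorted slices are equal (a duplicate exists iff it appears adjacently after sorting).
import Mathlib
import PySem

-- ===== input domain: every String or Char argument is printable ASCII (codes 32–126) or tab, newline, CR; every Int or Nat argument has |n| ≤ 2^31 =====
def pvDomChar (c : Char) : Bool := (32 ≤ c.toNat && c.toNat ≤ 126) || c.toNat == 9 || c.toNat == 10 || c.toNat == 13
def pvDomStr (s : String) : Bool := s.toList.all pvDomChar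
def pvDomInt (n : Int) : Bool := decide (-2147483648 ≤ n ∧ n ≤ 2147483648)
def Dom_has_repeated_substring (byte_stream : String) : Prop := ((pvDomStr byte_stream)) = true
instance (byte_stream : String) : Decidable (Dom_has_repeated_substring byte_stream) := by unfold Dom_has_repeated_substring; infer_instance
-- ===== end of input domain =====

-- B replaces A's incremental hash-count loop (with early return) by sorting all 3-char
-- slices and scanning for an equal adjacent pair; objective: alternative algorithm.

-- ===== PORT A =====
-- the for-loop with its early `return True`, as structural recursion over the index list
def hasRepLoop (s : String) : List Int → PySem.Dict String Int → Bool
  | [], _ => false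
  | i :: rest, d =>
    let substring := PySem.Str.slice s (some i) (some (i + 3))
    let d' := if d.contains substring then d.modify substring 0 (· + 1)
              else d.insert substring 1
    if d'.getD substring 0 > 1 then true else hasRepLoop s rest d'

def has_repeated_substring (byte_stream : String) : Bool :=
  hasRepLoop byte_stream
    (PySem.List.pyRange 0 (PySem.Str.len byte_stream - 2) 1) PySem.Dict.empty

-- ===== PORT B =====
-- any(subs[j] == subs[j+1] …): scan adjacent pairs of the sorted list
def hasAdjDup : List String → Bool
  | [] => false
  | [_] => false
  | a :: b :: t => if a == b then true else hasAdjDup (b :: t)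

def has_repeated_substring_alt (byte_stream : String) : Bool :=
  let subs := PySem.List.sorted
      ((PySem.List.pyRange 0 (PySem.Str.len byte_stream - 2) 1).map
        (fun i => PySem.Str.slice byte_stream (some i) (some (i + 3))))
      (fun x => x) false
  hasAdjDup subs

-- ===== PRECONDITION & SPEC =====
def Spec_has_repeated_substring (byte_stream : String) (out : Bool) : Prop := out = has_repeated_substring_alt byte_stream
instance (byte_stream : String) (out : Bool) : Decidable (Spec_has_repeated_substring byte_stream out) := by unfold Spec_has_repeated_substring; infer_instance

-- ===== CLAIM =====
def Claim_equal_has_repeated_substring : Prop := ∀ (byte_stream : String), Dom_has_repeated_substring byte_stream → Spec_has_repeated_substring byte_stream (has_repeated_substring byte_stream)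

-- ===== LEMMAS AND PROOFS =====

-- A's loop returns true iff the slices to come (plus the keys already counted) repeat.
theorem hasRepLoop_spec (s : String) (l : List Int) (d : PySem.Dict String Int)
    (hnd : d.keys.Nodup) (hinv : ∀ k, d.contains k = true → 1 ≤ d.getD k 0) :
    hasRepLoop s l d = true ↔
      ¬ (d.keys ++ l.map (fun i => PySem.Str.slice s (some i) (some (i + 3)))).Nodup := by
  induction l generalizing d with
  | nil => simp [hasRepLoop, hnd]
  | cons i rest ih =>
    simp only [hasRepLoop, List.map_cons]
    by_cases hc : d.contains (PySem.Str.slice s (some i) (some (i + 3))) = true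
    · have hmem : PySem.Str.slice s (some i) (some (i + 3)) ∈ d.keys :=
        (PySem.Dict.contains_iff_mem_keys _ _).mp hc
      have hgt : (if d.contains (PySem.Str.slice s (some i) (some (i + 3))) = true then
            d.modify (PySem.Str.slice s (some i) (some (i + 3))) 0 (· + 1)
          else d.insert (PySem.Str.slice s (some i) (some (i + 3))) 1).getD
            (PySem.Str.slice s (some i) (some (i + 3))) 0 > 1 := by
        rw [if_pos hc, PySem.Dict.getD_modify_self]
        have := hinv _ hc
        omega
      rw [if_pos hgt]
      refine iff_of_true rfl ?_
      intro hnodup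
      rw [List.nodup_append] at hnodup
      exact hnodup.2.2 _ hmem _ (List.mem_cons_self) rfl
    · have hc' : d.contains (PySem.Str.slice s (some i) (some (i + 3))) = false := by
        simpa using hc
      rw [if_neg hc]
      have hngt : ¬ ((d.insert (PySem.Str.slice s (some i) (some (i + 3))) 1).getD
            (PySem.Str.slice s (some i) (some (i + 3))) 0 > 1) := by
        rw [PySem.Dict.getD_insert_self]
        omega
      rw [if_neg hngt]
      rw [ih]
      · rw [PySem.Dict.keys_insert_of_not_contains _ _ hc']
        simp
      · exact PySem.Dict.nodup_keys_insert _ _ _ hnd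
      · intro k hk
        rw [PySem.Dict.contains_insert] at hk
        by_cases hks : k = PySem.Str.slice s (some i) (some (i + 3))
        · rw [hks, PySem.Dict.getD_insert_self]
        · have hk' : d.contains k = true := by
            simpa [hks] using hk
          rw [PySem.Dict.getD_insert_of_ne _ _ _ hks]
          exact hinv _ hk'

-- on a ≤-sorted list, an adjacent equal pair exists iff the list has a duplicate
theorem hasAdjDup_iff_not_nodup (l : List String) (hs : l.Pairwise (· ≤ ·)) :
    hasAdjDup l = true ↔ ¬ l.Nodup := by
  induction l with
  | nil => simp [hasAdjDup]
  | cons a t ih =>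
    cases t with
    | nil => simp [hasAdjDup]
    | cons b t' =>
      have hab : a ≤ b := (List.pairwise_cons.mp hs).1 _ List.mem_cons_self
      have hs' := (List.pairwise_cons.mp hs).2
      by_cases heq : a = b
      · simp only [hasAdjDup, heq, beq_self_eq_true, if_true]
        refine iff_of_true trivial ?_
        intro hnd
        exact (List.nodup_cons.mp hnd).1 (heq ▸ List.mem_cons_self)
      · have hlt : a < b := lt_of_le_of_ne hab heq
        simp only [hasAdjDup, beq_iff_eq, if_neg heq]
        rw [ih hs']
        have hna : a ∉ b :: t' := by
          intro hmem
          rcases List.mem_cons.mp hmem with h | h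
          · exact heq h
          · have : b ≤ a := (List.pairwise_cons.mp hs').1 _ h
            exact absurd (lt_of_lt_of_le hlt this) (lt_irrefl a)
        constructor
        · intro h hnd
          exact h (List.nodup_cons.mp hnd).2
        · intro h hnd'
          exact h (List.nodup_cons.mpr ⟨hna, hnd'⟩)

-- ===== VERDICT =====
theorem has_repeated_substring_spec : Claim_equal_has_repeated_substring := by
  intro s _
  unfold Spec_has_repeated_substring has_repeated_substring has_repeated_substring_alt
  rw [Bool.eq_iff_iff]
  rw [hasRepLoop_spec s _ PySem.Dict.empty (by simp [PySem.Dict.keys_empty])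
      (by intro k hk; rw [PySem.Dict.contains_empty] at hk; exact absurd hk (by simp))]
  simp only [PySem.Dict.keys_empty, List.nil_append]
  rw [hasAdjDup_iff_not_nodup _
      (PySem.List.sorted_pairwise
        ((PySem.List.pyRange 0 (PySem.Str.len s - 2) 1).map
          (fun i => PySem.Str.slice s (some i) (some (i + 3)))) (fun x => x))]
  rw [not_iff_not]
  exact ((PySem.List.sorted_perm _ _ _).nodup_iff).symm
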